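-- pv_equiv track=rewrite | github.com/holounic/university | machine-learning/cf-labs/M.py | clever_inner
-- ===== SOURCE A (Python) =====
-- def clever_inner(x, objs):
--     res = 0
--     for k in objs.keys():
--         pref_sum, suf_sum = 0, sum(objs[k])
--         x_size = len(objs[k])
--         arr = sorted(list(objs[k]))
--         for i in range(x_size):
--             x = arr[i]
--             pref_sum += x
--             suf_sum -= x
--             res += (x * (1 + i) - pref_sum) - (x * (x_size - i - 1) - suf_sum)
--     return res
-- ===== SOURCE B (Python) =====
-- def clever_inner(x, objs):
--     res = 0
--     for vals in objs.values():
--         for a in vals: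
--             for b in vals:
--                 res += abs(a - b)
--     return res
-- ===== Notes on version B (the rewrite author's own statement) =====
-- stated objective: simpler
-- what changed: B drops A's sort and prefix/suffix accumulator pass entirely: per group it sums abs(a-b) over all ordered pairs with a plain double loop, which equals A's result because A's pass computes exactly twice the sum of pairwise differences of the sorted group.
import Mathlib
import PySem

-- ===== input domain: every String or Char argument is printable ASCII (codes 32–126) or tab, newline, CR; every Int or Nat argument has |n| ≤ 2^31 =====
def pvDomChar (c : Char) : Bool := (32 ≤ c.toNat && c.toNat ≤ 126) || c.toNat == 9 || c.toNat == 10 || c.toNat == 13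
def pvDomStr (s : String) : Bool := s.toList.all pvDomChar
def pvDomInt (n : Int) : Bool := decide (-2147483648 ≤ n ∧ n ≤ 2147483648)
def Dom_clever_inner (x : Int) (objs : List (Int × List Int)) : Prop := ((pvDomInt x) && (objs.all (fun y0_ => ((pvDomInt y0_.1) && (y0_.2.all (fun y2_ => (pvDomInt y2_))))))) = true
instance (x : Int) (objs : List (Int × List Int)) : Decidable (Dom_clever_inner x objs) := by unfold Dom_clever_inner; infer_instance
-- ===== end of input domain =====

-- B drops A's sort and prefix/suffix accumulators: per group it sums abs(a-b) over all ordered pairs with a plain double loop (simpler decomposition).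


-- ===== PORT A =====
def clever_inner (x : Int) (objs : List (Int × List Int)) : Int :=
  let d := PySem.Dict.ofList objs
  d.keys.foldl (fun res k =>
    let vals := d.getD k []
    let sufSum0 : Int := vals.sum
    let xSize : Int := (vals.length : Int)
    let arr := PySem.List.sorted vals (fun v => v) false
    let st := (PySem.List.pyRange 0 xSize 1).foldl
      (fun (st : Int × Int × Int) i =>
        let xv := PySem.List.pyGetD arr i 0
        let pref := st.1 + xv
        let suf := st.2.1 - xv
        (pref, suf, st.2.2 + ((xv * (1 + i) - pref) - (xv * (xSize - i - 1) - suf))))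
      ((0 : Int), sufSum0, res)
    st.2.2) 0

-- ===== PORT B =====
def clever_inner_alt (x : Int) (objs : List (Int × List Int)) : Int :=
  (PySem.Dict.ofList objs).values.foldl (fun res vals =>
    vals.foldl (fun r a =>
      vals.foldl (fun r b => r + |a - b|) r) res) 0

-- ===== PRECONDITION & SPEC =====
def Spec_clever_inner (x : Int) (objs : List (Int × List Int)) (out : Int) : Prop := out = clever_inner_alt x objs
instance (x : Int) (objs : List (Int × List Int)) (out : Int) : Decidable (Spec_clever_inner x objs out) := by unfold Spec_clever_inner; infer_instance

-- ===== CLAIM (what is proved, stated in full; the proofs are below) =====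
def Claim_equal_clever_inner : Prop := ∀ (x : Int) (objs : List (Int × List Int)), Dom_clever_inner x objs → Spec_clever_inner x objs (clever_inner x objs)

-- ===== LEMMAS AND PROOFS =====

-- Sum of |a-b| over all ordered pairs (a from l, b from m).
def pairAbsSum (l m : List Int) : Int :=
  (l.map (fun a => (m.map (fun b => |a - b|)).sum)).sum

-- The inner loop of A, folded over enumerate arr s, fully characterised.
theorem clever_loopA (n : Int) (arr : List Int) : ∀ (s p0 s0 r0 : Int),
    (PySem.List.enumerate arr s).foldl
      (fun (st : Int × Int × Int) (q : Int × Int) =>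
        (st.1 + q.2, st.2.1 - q.2,
         st.2.2 + ((q.2 * (1 + q.1) - (st.1 + q.2)) - (q.2 * (n - q.1 - 1) - (st.2.1 - q.2)))))
      (p0, s0, r0)
    = (p0 + arr.sum, s0 - arr.sum,
       r0 + (arr.length : Int) * (s0 - p0)
          + ((PySem.List.enumerate arr s).map
              (fun q => q.2 * (4 * q.1 - 2 * s - n - 2 * (arr.length : Int) + 2))).sum) := by
  induction arr with
  | nil => intro s p0 s0 r0; simp [PySem.List.enumerate_nil]
  | cons x t ih =>
    intro s p0 s0 r0
    rw [PySem.List.enumerate_cons]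
    simp only [List.foldl_cons, List.map_cons, List.sum_cons, List.length_cons]
    rw [ih]
    have hmap : (PySem.List.enumerate t (s + 1)).map
          (fun q => q.2 * (4 * q.1 - 2 * (s + 1) - n - 2 * (t.length : Int) + 2))
        = (PySem.List.enumerate t (s + 1)).map
          (fun q => q.2 * (4 * q.1 - 2 * s - n - 2 * ((t.length : Int) + 1) + 2)) := by
      apply List.map_congr_left; intro q _; ring
    rw [hmap]
    refine Prod.ext (by push_cast; ring) (Prod.ext (by push_cast; ring) ?_)
    simp only
    push_cast
    ring

-- One group of A (range-indexed prefix/suffix loop) equals the index-weighted sum over the sorted array.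
theorem clever_step' (arr : List Int) (res : Int) :
    ((PySem.List.pyRange 0 (arr.length : Int) 1).foldl
       (fun (st : Int × Int × Int) (i : Int) =>
         (st.1 + PySem.List.pyGetD arr i 0, st.2.1 - PySem.List.pyGetD arr i 0,
          st.2.2 + ((PySem.List.pyGetD arr i 0 * (1 + i) - (st.1 + PySem.List.pyGetD arr i 0))
            - (PySem.List.pyGetD arr i 0 * ((arr.length : Int) - i - 1) - (st.2.1 - PySem.List.pyGetD arr i 0)))))
       ((0 : Int), arr.sum, res)).2.2
    = res + 2 * ((PySem.List.enumerate arr).map (fun q => q.2 * (2 * q.1 - ((arr.length : Int) - 1)))).sum := by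
  have hrange : PySem.List.pyRange 0 (arr.length : Int) 1
      = (PySem.List.enumerate arr).map (fun q => q.1) := by
    rw [PySem.List.enumerate_eq_map_pyRange arr (d := 0), List.map_map,
        show ((fun q : Int × Int => q.1) ∘ fun j => (j, PySem.List.pyGetD arr j 0)) = id from rfl,
        List.map_id]
    simp [PySem.List.len_eq]
  rw [hrange, List.foldl_map]
  have hcongr := PySem.List.foldl_congr_mem
    (l := PySem.List.enumerate arr)
    (init := (((0 : Int), arr.sum, res) : Int × Int × Int))
    (f := fun (st : Int × Int × Int) (q : Int × Int) =>
         (st.1 + PySem.List.pyGetD arr q.1 0, st.2.1 - PySem.List.pyGetD arr q.1 0,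
          st.2.2 + ((PySem.List.pyGetD arr q.1 0 * (1 + q.1) - (st.1 + PySem.List.pyGetD arr q.1 0))
            - (PySem.List.pyGetD arr q.1 0 * ((arr.length : Int) - q.1 - 1) - (st.2.1 - PySem.List.pyGetD arr q.1 0)))))
    (g := fun (st : Int × Int × Int) (q : Int × Int) =>
        (st.1 + q.2, st.2.1 - q.2,
         st.2.2 + ((q.2 * (1 + q.1) - (st.1 + q.2)) - (q.2 * ((arr.length : Int) - q.1 - 1) - (st.2.1 - q.2)))))
    (by
      intro st q hq
      obtain ⟨k, hk, rfl⟩ := (PySem.List.mem_enumerate_iff _ _ _).mp hq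
      simp only [zero_add]
      rw [PySem.List.pyGetD_natCast]
      simp [List.getD_eq_getElem?_getD, hk])
  rw [hcongr]
  rw [clever_loopA (arr.length : Int) arr 0 0 arr.sum res]
  simp only
  have hsum2 : arr.sum = ((PySem.List.enumerate arr).map (fun q : Int × Int => q.2)).sum := by
    rw [PySem.List.map_snd_enumerate]
  rw [hsum2]
  induction (PySem.List.enumerate arr) with
  | nil => simp
  | cons p l ihl =>
    simp only [List.map_cons, List.sum_cons] at *
    ring_nf at ihl ⊢
    linarith [ihl]

-- Split the coefficient c = (c-1) + 1 inside an enumerate-weighted sum.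
theorem sum_map_split (l : List (Int × Int)) (c : Int) :
    (l.map (fun q => q.2 * (2 * q.1 - c))).sum
      = (l.map (fun q => q.2 * (2 * q.1 - (c + 1)))).sum + (l.map (fun q : Int × Int => q.2)).sum := by
  induction l with
  | nil => simp
  | cons p t ih => simp only [List.map_cons, List.sum_cons, ih]; ring

-- Pointwise additivity of a mapped sum.
theorem sum_map_add (l : List Int) (f g : Int → Int) :
    (l.map (fun a => f a + g a)).sum = (l.map f).sum + (l.map g).sum := by
  induction l with
  | nil => simp
  | cons a t ih => simp only [List.map_cons, List.sum_cons, ih]; ring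

-- Sum of |x - b| over a list all of whose elements dominate x.
theorem sum_abs_ge (x : Int) (t : List Int) (h : ∀ b ∈ t, x ≤ b) :
    (t.map (fun b => |x - b|)).sum = t.sum - (t.length : Int) * x := by
  induction t with
  | nil => simp
  | cons b s ih =>
    have hb : x ≤ b := h b (by simp)
    have habs : |x - b| = b - x := by rw [abs_sub_comm]; exact abs_of_nonneg (by omega)
    simp only [List.map_cons, List.sum_cons, List.length_cons, habs,
      ih (fun y hy => h y (by simp [hy]))]
    push_cast; ring

-- On a sorted list, A's index-weighted closed form equals the ordered-pairs |a-b| sum.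
theorem sortedT (arr : List Int) (hs : arr.Pairwise (· ≤ ·)) : ∀ s : Int,
    2 * ((PySem.List.enumerate arr s).map
          (fun q => q.2 * (2 * q.1 - (2 * s + (arr.length : Int) - 1)))).sum
      = pairAbsSum arr arr := by
  induction arr with
  | nil => intro s; simp [pairAbsSum]
  | cons x t ih =>
    intro s
    obtain ⟨hx, ht⟩ := List.pairwise_cons.mp hs
    rw [PySem.List.enumerate_cons]
    simp only [List.map_cons, List.sum_cons, List.length_cons]
    have hsplit := sum_map_split (PySem.List.enumerate t (s + 1)) (2 * s + ((t.length : Int) + 1) - 1)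
    have hcoef : (PySem.List.enumerate t (s + 1)).map
          (fun q => q.2 * (2 * q.1 - (2 * s + ((t.length : Int) + 1) - 1 + 1)))
        = (PySem.List.enumerate t (s + 1)).map
          (fun q => q.2 * (2 * q.1 - (2 * (s + 1) + (t.length : Int) - 1))) := by
      apply List.map_congr_left; intro q _; ring
    have hsnd : ((PySem.List.enumerate t (s + 1)).map (fun q : Int × Int => q.2)).sum = t.sum := by
      rw [PySem.List.map_snd_enumerate]
    -- RHS recurrence
    have hxt : (t.map (fun b => |x - b|)).sum = t.sum - (t.length : Int) * x := sum_abs_ge x t hx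
    have htx : (t.map (fun a => |a - x|)).sum = t.sum - (t.length : Int) * x := by
      have : (t.map (fun a => |a - x|)) = (t.map (fun b => |x - b|)) := by
        apply List.map_congr_left; intro a _; rw [abs_sub_comm]
      rw [this, hxt]
    have hrhs : pairAbsSum (x :: t) (x :: t)
        = 2 * (t.sum - (t.length : Int) * x) + pairAbsSum t t := by
      simp only [pairAbsSum, List.map_cons, List.sum_cons, sub_self, abs_zero]
      rw [sum_map_add t (fun a => |a - x|) (fun a => (t.map (fun b => |a - b|)).sum), htx, hxt]; ring
    rw [hrhs, ← ih ht (s + 1)]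
    push_cast at hsplit ⊢
    rw [hsplit, hcoef, hsnd]
    ring

-- ===== VERDICT (by name: the statement is the Claim_ definition above) =====
theorem clever_inner_spec : Claim_equal_clever_inner := by
  intro x objs _
  unfold Spec_clever_inner clever_inner clever_inner_alt
  simp only
  set d := PySem.Dict.ofList objs with hd
  rw [show d.keys = d.items.map (fun p => p.1) from rfl,
      show d.values = d.items.map (fun p => p.2) from rfl]
  rw [List.foldl_map, List.foldl_map]
  apply PySem.List.foldl_congr_mem
  intro res p hp
  obtain ⟨k, v⟩ := p
  have hnodup : d.keys.Nodup := by rw [hd]; exact PySem.Dict.nodup_keys_ofList objs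
  have hget : d.getD k [] = v := PySem.Dict.getD_of_mem_items d hp hnodup []
  simp only [hget]
  -- A side: reduce the prefix/suffix loop over the sorted array
  have hperm := PySem.List.sorted_perm v (fun v => v) false
  have hlen : (PySem.List.sorted v (fun v => v) false).length = v.length := hperm.length_eq
  have hsum : (PySem.List.sorted v (fun v => v) false).sum = v.sum := hperm.sum_eq
  rw [← hlen, ← hsum]
  rw [clever_step' (PySem.List.sorted v (fun v => v) false) res]
  -- index-weighted form = pairAbsSum over sorted array
  have hpair := sortedT (PySem.List.sorted v (fun v => v) false)
    (PySem.List.sorted_pairwise v (fun v => v)) 0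
  have hc : ((PySem.List.enumerate (PySem.List.sorted v (fun v => v) false)).map
        (fun q => q.2 * (2 * q.1 - (((PySem.List.sorted v (fun v => v) false).length : Int) - 1))))
      = ((PySem.List.enumerate (PySem.List.sorted v (fun v => v) false)).map
        (fun q => q.2 * (2 * q.1 - (2 * 0 + ((PySem.List.sorted v (fun v => v) false).length : Int) - 1)))) := by
    apply List.map_congr_left; intro q _; ring
  rw [hc, hpair]
  -- pairAbsSum is permutation-invariant, sorted v ~ v
  have hpp : pairAbsSum (PySem.List.sorted v (fun v => v) false) (PySem.List.sorted v (fun v => v) false)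
      = pairAbsSum v v := by
    unfold pairAbsSum
    have h1 : ∀ m : List Int,
        ((PySem.List.sorted v (fun v => v) false).map (fun a => (m.map (fun b => |a - b|)).sum)).sum
          = (v.map (fun a => (m.map (fun b => |a - b|)).sum)).sum := by
      intro m; exact (hperm.map _).sum_eq
    rw [h1 (PySem.List.sorted v (fun v => v) false)]
    congr 1
    apply List.map_congr_left
    intro a _
    exact (hperm.map (fun b => |a - b|)).sum_eq
  rw [hpp]
  symm
  -- B side: the double loop computes res + pairAbsSum v v
  have hinner : ∀ (a r : Int), v.foldl (fun r b => r + |a - b|) r = r + (v.map (fun b => |a - b|)).sum := by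
    intro a r; exact PySem.List.foldl_add (l := v) (a := r) (g := fun b => |a - b|)
  have hB := PySem.List.foldl_congr_mem (l := v) (init := res)
    (f := fun r a => List.foldl (fun r b => r + |a - b|) r v)
    (g := fun r a => r + (v.map (fun b => |a - b|)).sum)
    (by intro r a _; exact hinner a r)
  rw [hB, PySem.List.foldl_add]
  rfl
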